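-- pv_equiv track=rewrite | github.com/allienLama/NewLab2 | lab2.py | find_blacklisted_urls
-- ===== SOURCE A (Python) =====
-- def find_blacklisted_urls(url_status, blacklist):
--     blacklisted_urls = []
--     for url, status in url_status:
--         for domain in blacklist:
--             if domain in url:
--                 blacklisted_urls.append((url, status))
--                 break
--     return blacklisted_urls
-- ===== SOURCE B (Python) =====
-- def find_blacklisted_urls(url_status, blacklist):
--     # pattern-outer pass: collect the index set of matching urls, then emit in input order
--     matched = set()
--     n = len(url_status)
--     for domain in blacklist:
--         if len(matched) == n:
--             break
--         for i, (url, _status) in enumerate(url_status):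
--             if i not in matched and domain in url:
--                 matched.add(i)
--     return [pair for i, pair in enumerate(url_status) if i in matched]
-- ===== Notes on version B (the rewrite author's own statement) =====
-- stated objective: alternative
-- what changed: A scans the blacklist per url with an early break; B inverts the loop nest (blacklist outer), accumulating a set of matched url indices with a not-yet-matched guard and an all-matched early break, then rebuilds the output in input order by a final enumerate filter.
import Mathlib
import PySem

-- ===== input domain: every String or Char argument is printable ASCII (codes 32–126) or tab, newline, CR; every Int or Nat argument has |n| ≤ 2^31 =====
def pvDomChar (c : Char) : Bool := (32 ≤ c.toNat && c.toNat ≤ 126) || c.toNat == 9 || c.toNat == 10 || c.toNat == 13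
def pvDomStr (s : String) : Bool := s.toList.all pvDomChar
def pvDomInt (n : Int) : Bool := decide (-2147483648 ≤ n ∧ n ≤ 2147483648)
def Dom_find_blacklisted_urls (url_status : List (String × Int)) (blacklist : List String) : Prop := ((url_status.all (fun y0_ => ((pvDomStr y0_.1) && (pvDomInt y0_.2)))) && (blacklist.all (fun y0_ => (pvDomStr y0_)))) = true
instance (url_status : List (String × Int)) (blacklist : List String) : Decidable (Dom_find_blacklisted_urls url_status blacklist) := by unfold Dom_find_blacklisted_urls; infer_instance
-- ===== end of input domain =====

-- B inverts A's loop nest: blacklist-outer index-set accumulation, then one ordered rebuild (alternative structure, same cost).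


-- ===== PORT A =====
-- inner 'for domain in blacklist: if domain in url: … break' — first-match scan
def pvHitA (blacklist : List String) (url : String) : Bool :=
  match blacklist with
  | [] => false
  | d :: rest => if PySem.Str.isIn d url then true else pvHitA rest url

def find_blacklisted_urls (url_status : List (String × Int)) (blacklist : List String) : List (String × Int) :=
  url_status.foldl (fun acc p => if pvHitA blacklist p.1 then acc ++ [p] else acc) []

-- ===== PORT B =====
-- outer 'for domain in blacklist' with the all-matched early break, accumulating the index set
def pvBuildMatched (url_status : List (String × Int)) : List String → PySem.Set Int → PySem.Set Int
  | [], m => m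
  | d :: rest, m =>
    if PySem.Set.len m == url_status.length then m
    else pvBuildMatched url_status rest
      ((PySem.List.enumerate url_status).foldl
        (fun m p => if !(PySem.Set.contains m p.1) && PySem.Str.isIn d p.2.1 then PySem.Set.add m p.1 else m) m)

def find_blacklisted_urls_alt (url_status : List (String × Int)) (blacklist : List String) : List (String × Int) :=
  let matched : PySem.Set Int := pvBuildMatched url_status blacklist PySem.Set.empty
  (PySem.List.enumerate url_status).foldl
    (fun acc p => if PySem.Set.contains matched p.1 then acc ++ [p.2] else acc) []

-- ===== PRECONDITION & SPEC =====
def Spec_find_blacklisted_urls (url_status : List (String × Int)) (blacklist : List String) (out : List (String × Int)) : Prop := out = find_blacklisted_urls_alt url_status blacklist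
instance (url_status : List (String × Int)) (blacklist : List String) (out : List (String × Int)) : Decidable (Spec_find_blacklisted_urls url_status blacklist out) := by unfold Spec_find_blacklisted_urls; infer_instance

-- ===== CLAIM (what is proved, stated in full; the proofs are below) =====
def Claim_equal_find_blacklisted_urls : Prop := ∀ (url_status : List (String × Int)) (blacklist : List String), Dom_find_blacklisted_urls url_status blacklist → Spec_find_blacklisted_urls url_status blacklist (find_blacklisted_urls url_status blacklist)

-- ===== LEMMAS AND PROOFS =====

-- A's first-match scan is an 'any' over the blacklist
theorem pvHitA_eq_any (blacklist : List String) (url : String) :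
    pvHitA blacklist url = blacklist.any (fun d => PySem.Str.isIn d url) := by
  induction blacklist with
  | nil => rfl
  | cons d rest ih =>
    rw [List.any_cons, ← ih]
    show (if PySem.Str.isIn d url then true else pvHitA rest url) = _
    cases hv : PySem.Str.isIn d url
    · simp
    · simp

-- membership after B's inner (per-domain) pass; the not-yet-matched guard does not change the set
theorem mem_inner (d : String) (l : List (Int × (String × Int))) (m : PySem.Set Int) (i : Int) :
    (i ∈ l.foldl (fun m p => if !(PySem.Set.contains m p.1) && PySem.Str.isIn d p.2.1 then PySem.Set.add m p.1 else m) m)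
      ↔ i ∈ m ∨ ∃ p ∈ l, p.1 = i ∧ PySem.Str.isIn d p.2.1 = true := by
  induction l generalizing m with
  | nil => simp
  | cons q t ih =>
    simp only [List.foldl_cons, List.mem_cons]
    by_cases hc : q.1 ∈ m
    · rw [if_neg (by rw [Bool.and_eq_true]; rintro ⟨hnc, -⟩; rw [(PySem.Set.contains_iff m q.1).mpr hc] at hnc; exact absurd hnc (by decide)), ih]
      constructor
      · rintro (hm | ⟨p, hp, hi, hd⟩)
        · exact Or.inl hm
        · exact Or.inr ⟨p, Or.inr hp, hi, hd⟩
      · rintro (hm | ⟨p, hp | hp, hi, hd⟩)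
        · exact Or.inl hm
        · subst hp; exact Or.inl (hi ▸ hc)
        · exact Or.inr ⟨p, hp, hi, hd⟩
    · by_cases h : PySem.Str.isIn d q.2.1 = true
      · have hcf : m.contains q.1 = false := by
          cases hcc : m.contains q.1
          · rfl
          · exact absurd ((PySem.Set.contains_iff m q.1).mp hcc) hc
        rw [if_pos (by rw [Bool.and_eq_true, hcf]; exact ⟨rfl, h⟩), ih]
        simp only [PySem.Set.mem_add]
        constructor
        · rintro (⟨hm | hq⟩ | ⟨p, hp, hi, hd⟩)
          · exact Or.inl hm
          · exact Or.inr ⟨q, Or.inl rfl, hq.symm, h⟩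
          · exact Or.inr ⟨p, Or.inr hp, hi, hd⟩
        · rintro (hm | ⟨p, hp | hp, hi, hd⟩)
          · exact Or.inl (Or.inl hm)
          · subst hp; exact Or.inl (Or.inr hi.symm)
          · exact Or.inr ⟨p, hp, hi, hd⟩
      · rw [if_neg (by rw [Bool.and_eq_true]; rintro ⟨-, hh⟩; exact h hh), ih]
        constructor
        · rintro (hm | ⟨p, hp, hi, hd⟩)
          · exact Or.inl hm
          · exact Or.inr ⟨p, Or.inr hp, hi, hd⟩
        · rintro (hm | ⟨p, hp | hp, hi, hd⟩)
          · exact Or.inl hm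
          · subst hp; exact absurd hd h
          · exact Or.inr ⟨p, hp, hi, hd⟩

-- B's inner pass preserves distinctness of the index set
theorem nodup_inner (d : String) (l : List (Int × (String × Int))) (m : PySem.Set Int)
    (hm : m.Nodup) :
    (l.foldl (fun m p => if !(PySem.Set.contains m p.1) && PySem.Str.isIn d p.2.1 then PySem.Set.add m p.1 else m) m).Nodup := by
  induction l generalizing m with
  | nil => exact hm
  | cons q t ih =>
    simp only [List.foldl_cons]
    by_cases hg : (!(PySem.Set.contains m q.1) && PySem.Str.isIn d q.2.1) = true
    · rw [if_pos hg]; exact ih _ (PySem.Set.nodup_add m q.1 hm)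
    · rw [if_neg hg]; exact ih _ hm

-- pigeonhole: a distinct index set of full length contains every index of the enumeration
theorem full_of_len (us : List (String × Int)) (m : PySem.Set Int) (hnd : m.Nodup)
    (hsub : ∀ j ∈ m, j ∈ (PySem.List.enumerate us).map (·.1)) (hlen : m.length = us.length) :
    ∀ p ∈ PySem.List.enumerate us, p.1 ∈ m := by
  have hfnd : ((PySem.List.enumerate us).map (·.1)).Nodup := by
    have h2 : ((PySem.List.enumerate us).map (·.1)).Pairwise (· < ·) := by
      rw [List.pairwise_map]; exact PySem.List.pairwise_lt_enumerate us 0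
    exact h2.imp (fun hlt => ne_of_lt hlt)
  have hflen : ((PySem.List.enumerate us).map (·.1)).length = us.length := by
    simp [PySem.List.length_enumerate]
  have hperm : m.Perm ((PySem.List.enumerate us).map (·.1)) :=
    List.Subperm.perm_of_length_le (List.Nodup.subperm hnd hsub) (by omega)
  intro p hp
  exact hperm.mem_iff.mpr (List.mem_map.mpr ⟨p, hp, rfl⟩)

-- membership in B's final matched set (with the early break)
theorem mem_build (us : List (String × Int)) (i : Int) :
    ∀ (bl : List String) (m : PySem.Set Int), m.Nodup →
    (∀ j ∈ m, j ∈ (PySem.List.enumerate us).map (·.1)) →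
    (i ∈ pvBuildMatched us bl m
      ↔ i ∈ m ∨ ∃ d ∈ bl, ∃ p ∈ PySem.List.enumerate us, p.1 = i ∧ PySem.Str.isIn d p.2.1 = true) := by
  intro bl
  induction bl with
  | nil => intro m _ _; simp [pvBuildMatched]
  | cons d rest ih =>
    intro m hnd hsub
    by_cases hb : (PySem.Set.len m == us.length) = true
    · rw [show pvBuildMatched us (d :: rest) m = m by rw [pvBuildMatched, if_pos hb]]
      have hlen : m.length = us.length := by
        have h' := eq_of_beq hb
        simp only [PySem.Set.len] at h'
        exact_mod_cast h'
      have hfull := full_of_len us m hnd hsub hlen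
      constructor
      · exact Or.inl
      · rintro (hm | ⟨e, _, p, hp, hi, -⟩)
        · exact hm
        · exact hi ▸ hfull p hp
    · rw [show pvBuildMatched us (d :: rest) m
            = pvBuildMatched us rest
                ((PySem.List.enumerate us).foldl
                  (fun m p => if !(PySem.Set.contains m p.1) && PySem.Str.isIn d p.2.1 then PySem.Set.add m p.1 else m) m)
          by rw [pvBuildMatched, if_neg hb]]
      rw [ih _ (nodup_inner d _ m hnd)
            (fun j hj => by
              rcases (mem_inner d _ m j).mp hj with hm | ⟨p, hp, hi, -⟩
              · exact hsub j hm
              · exact hi ▸ List.mem_map.mpr ⟨p, hp, rfl⟩),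
          mem_inner]
      constructor
      · rintro (⟨hm | ⟨p, hp, hi, hd⟩⟩ | ⟨e, he, hrest⟩)
        · exact Or.inl hm
        · exact Or.inr ⟨d, List.mem_cons_self, p, hp, hi, hd⟩
        · exact Or.inr ⟨e, List.mem_cons_of_mem d he, hrest⟩
      · rintro (hm | ⟨e, he, hrest⟩)
        · exact Or.inl (Or.inl hm)
        · rcases List.mem_cons.mp he with he | he
          · subst he; exact Or.inl (Or.inr hrest)
          · exact Or.inr ⟨e, he, hrest⟩

-- filtering enumerate on the value component, then dropping indices, is filtering the list
theorem filter_enumerate_map_snd (r : (String × Int) → Bool) :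
    ∀ (us : List (String × Int)) (s : Int),
    (((PySem.List.enumerate us s).filter (fun p => r p.2)).map (·.2)) = us.filter r := by
  intro us
  induction us with
  | nil => intro s; rfl
  | cons x t ih =>
    intro s
    simp only [PySem.List.enumerate_cons, List.filter_cons]
    by_cases h : r x
    · simp [h, ih]
    · simp [h, ih]

theorem find_blacklisted_urls_eq_filter (us : List (String × Int)) (bl : List String) :
    find_blacklisted_urls us bl = us.filter (fun p => bl.any (fun d => PySem.Str.isIn d p.1)) := by
  unfold find_blacklisted_urls
  rw [PySem.List.foldl_append_if_eq_filter]
  simp only [List.nil_append]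
  exact List.filter_congr (fun p _ => pvHitA_eq_any bl p.1)

theorem find_blacklisted_urls_alt_eq_filter (us : List (String × Int)) (bl : List String) :
    find_blacklisted_urls_alt us bl = us.filter (fun p => bl.any (fun d => PySem.Str.isIn d p.1)) := by
  unfold find_blacklisted_urls_alt
  rw [PySem.List.foldl_append_if (f := fun p : Int × (String × Int) => p.2)]
  simp only [List.nil_append]
  rw [← filter_enumerate_map_snd (fun x => bl.any (fun d => PySem.Str.isIn d x.1)) us 0]
  congr 1
  apply List.filter_congr
  intro p hp
  rw [PySem.List.mem_enumerate_iff] at hp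
  obtain ⟨k, hk, rfl⟩ := hp
  rw [Bool.eq_iff_iff, PySem.Set.contains_iff,
     mem_build us _ bl PySem.Set.empty List.nodup_nil (by intro j hj; simp [PySem.Set.empty] at hj)]
  constructor
  · rintro (hm | ⟨d, hd, q, hq, hi, hdd⟩)
    · simp [PySem.Set.empty] at hm
    · rw [PySem.List.mem_enumerate_iff] at hq
      obtain ⟨k', hk', rfl⟩ := hq
      have hkk : k' = k := by simp at hi; omega
      subst hkk
      rw [List.any_eq_true]
      exact ⟨d, hd, hdd⟩
  · rw [List.any_eq_true]
    rintro ⟨d, hd, hdd⟩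
    exact Or.inr ⟨d, hd, ((0 : Int) + k, us[k]),
      (PySem.List.mem_enumerate_iff _ _ _).2 ⟨k, hk, rfl⟩, rfl, hdd⟩

-- ===== VERDICT (by name: the statement is the Claim_ definition above) =====
theorem find_blacklisted_urls_spec : Claim_equal_find_blacklisted_urls := by
  intro us bl _
  unfold Spec_find_blacklisted_urls
  rw [find_blacklisted_urls_eq_filter, find_blacklisted_urls_alt_eq_filter]
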